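-- pv_equiv track=rewrite | github.com/StanfordVL/OmniGibson | EmbodiedVLM/utils/state_change_translator.py | _is_sequential_pattern
-- ===== SOURCE A (Python) =====
-- def _is_sequential_pattern(part: str) -> bool:
--     """
--     Check if a string is a sequential alphabetical pattern.
--
--     Examples: "abcdef", "defghi", "mnopqr"
--
--     Args:
--         part: String to check
--
--     Returns:
--         bool: True if it's a sequential pattern
--     """
--     if len(part) < 3:
--         return False
--
--     # Check for ascending sequential pattern
--     is_ascending = True
--     for i in range(1, len(part)):
--         if ord(part[i]) != ord(part[i-1]) + 1:
--             is_ascending = False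
--             break
--
--     if is_ascending:
--         return True
--
--     # Check for descending sequential pattern
--     is_descending = True
--     for i in range(1, len(part)):
--         if ord(part[i]) != ord(part[i-1]) - 1:
--             is_descending = False
--             break
--
--     return is_descending
-- ===== SOURCE B (Python) =====
-- def _is_sequential_pattern(part: str) -> bool:
--     if len(part) < 3:
--         return False
--     base = ord(part[0])
--     step = ord(part[1]) - base
--     if step != 1 and step != -1:
--         return False
--     return all(ord(c) == base + i * step for i, c in enumerate(part))
-- ===== Notes on version B (the rewrite author's own statement) =====
-- stated objective: alternative
-- what changed: Instead of A's two directional adjacent-pair scans with flags and break, B derives the step once from the first two characters, rejects unless it is +-1, and verifies the string against the closed-form arithmetic progression ord(part[0]) + i*step in one enumerate pass.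
import Mathlib
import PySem

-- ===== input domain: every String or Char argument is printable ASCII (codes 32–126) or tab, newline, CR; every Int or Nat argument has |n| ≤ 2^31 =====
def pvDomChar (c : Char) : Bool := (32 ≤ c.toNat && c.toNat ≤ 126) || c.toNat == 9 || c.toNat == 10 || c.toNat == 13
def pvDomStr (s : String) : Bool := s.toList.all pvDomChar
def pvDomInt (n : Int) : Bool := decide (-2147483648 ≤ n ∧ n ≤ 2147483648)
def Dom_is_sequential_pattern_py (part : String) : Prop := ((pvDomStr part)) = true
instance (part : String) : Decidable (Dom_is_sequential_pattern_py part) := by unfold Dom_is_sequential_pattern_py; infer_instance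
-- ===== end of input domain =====

-- B derives the step from the first two characters and verifies the string against the
-- arithmetic progression ord(part[0]) + i*step in one pass, instead of A's two
-- directional adjacent-pair scans (objective: alternative).

-- ===== PORT A =====
-- the 'for i in range(1, len(part))' ascending scan with break: walks adjacent pairs
def pvAscScan : List Char → Bool
  | a :: b :: rest => if (b.toNat : Int) ≠ (a.toNat : Int) + 1 then false else pvAscScan (b :: rest)
  | _ => true

-- the descending scan with break
def pvDescScan : List Char → Bool
  | a :: b :: rest => if (b.toNat : Int) ≠ (a.toNat : Int) - 1 then false else pvDescScan (b :: rest)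
  | _ => true

def is_sequential_pattern_py (part : String) : Bool :=
  let cs := part.toList
  if cs.length < 3 then false
  else
    let is_ascending := pvAscScan cs
    if is_ascending then true
    else pvDescScan cs

-- ===== PORT B =====
def is_sequential_pattern_py_alt (part : String) : Bool :=
  let cs := part.toList
  if cs.length < 3 then false
  else
    match cs with
    | c0 :: c1 :: _ =>
      let base : Int := c0.toNat
      let step : Int := (c1.toNat : Int) - base
      if step ≠ 1 ∧ step ≠ -1 then false
      else (PySem.List.enumerate cs 0).all (fun p => decide ((p.2.toNat : Int) = base + p.1 * step))
    | _ => false   -- unreachable: cs.length ≥ 3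

-- ===== PRECONDITION & SPEC =====
def Spec_is_sequential_pattern_py (part : String) (out : Bool) : Prop := out = is_sequential_pattern_py_alt part
instance (part : String) (out : Bool) : Decidable (Spec_is_sequential_pattern_py part out) := by unfold Spec_is_sequential_pattern_py; infer_instance

-- ===== CLAIM =====
def Claim_equal_is_sequential_pattern_py : Prop := ∀ (part : String), Dom_is_sequential_pattern_py part → Spec_is_sequential_pattern_py part (is_sequential_pattern_py part)

-- ===== LEMMAS AND PROOFS =====

-- generic directional chain scan (proof-only helper)
def pvChain (d : Int) : List Char → Bool
  | a :: b :: rest => if (b.toNat : Int) ≠ (a.toNat : Int) + d then false else pvChain d (b :: rest)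
  | _ => true

theorem pvAscScan_eq_chain (cs : List Char) : pvAscScan cs = pvChain 1 cs := by
  match cs with
  | [] => rfl
  | [a] => rfl
  | a :: b :: rest =>
    rw [pvAscScan, pvChain, pvAscScan_eq_chain (b :: rest)]

theorem pvDescScan_eq_chain (cs : List Char) : pvDescScan cs = pvChain (-1) cs := by
  match cs with
  | [] => rfl
  | [a] => rfl
  | a :: b :: rest =>
    rw [pvDescScan, pvChain, pvDescScan_eq_chain (b :: rest)]
    have : ((a.toNat : Int) - 1) = (a.toNat : Int) + (-1) := by ring
    rw [this]

-- the chain scan holds iff every adjacent step is d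
theorem pvChain_iff_adj (d : Int) (cs : List Char) :
    pvChain d cs = true ↔ ∀ k (h : k + 1 < cs.length), ((cs[k+1]).toNat : Int) = (cs[k]).toNat + d := by
  match cs with
  | [] => simp [pvChain]
  | [a] => simp [pvChain]
  | a :: b :: rest =>
    rw [pvChain]
    by_cases hb : (b.toNat : Int) ≠ (a.toNat : Int) + d
    · rw [if_pos hb]
      simp only [Bool.false_eq_true, false_iff]
      intro h
      exact hb (by simpa using h 0 (by simp))
    · rw [if_neg hb]
      have hb' : (b.toNat : Int) = (a.toNat : Int) + d := not_not.mp hb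
      rw [pvChain_iff_adj d (b :: rest)]
      constructor
      · intro h k hk
        match k with
        | 0 => simpa using hb'
        | k + 1 =>
          have := h k (by simpa using hk)
          simpa using this
      · intro h k hk
        have := h (k + 1) (by simpa using hk)
        simpa using this

-- adjacent step d from the head onwards iff the linear closed form holds
theorem adj_iff_lin (d : Int) (a : Char) (cs : List Char) :
    (∀ k (h : k + 1 < (a :: cs).length), (((a :: cs)[k+1]).toNat : Int) = ((a :: cs)[k]).toNat + d)
      ↔ ∀ k (h : k < (a :: cs).length), (((a :: cs)[k]).toNat : Int) = (a.toNat : Int) + k * d := by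
  constructor
  · intro h k
    induction k with
    | zero => simp
    | succ k ih =>
      intro hk
      have h1 := h k hk
      have h2 := ih (by omega)
      rw [h1, h2]
      push_cast
      ring
  · intro h k hk
    have h1 := h (k + 1) hk
    have h2 := h k (by omega)
    rw [h1, h2]
    push_cast
    ring

-- B's enumerate-all equals the linear closed form
theorem enum_all_iff_lin (cs : List Char) (base d : Int) :
    ((PySem.List.enumerate cs 0).all (fun p => decide ((p.2.toNat : Int) = base + p.1 * d)) = true)
      ↔ ∀ k (h : k < cs.length), ((cs[k]).toNat : Int) = base + k * d := by
  rw [List.all_eq_true]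
  constructor
  · intro h k hk
    have := h (((0 : Int) + k, cs[k])) (by
      rw [PySem.List.mem_enumerate_iff]; exact ⟨k, hk, rfl⟩)
    simpa using this
  · intro h p hp
    rw [PySem.List.mem_enumerate_iff] at hp
    obtain ⟨k, hk, rfl⟩ := hp
    simpa using h k hk

-- ===== VERDICT =====
theorem is_sequential_pattern_py_spec : Claim_equal_is_sequential_pattern_py := by
  intro part _
  unfold Spec_is_sequential_pattern_py is_sequential_pattern_py is_sequential_pattern_py_alt
  set cs := part.toList with hcs
  by_cases hlen : cs.length < 3
  · simp [hlen]
  · simp only [hlen, if_false]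
    match cs, hlen with
    | [], hlen => exact absurd (by simp) hlen
    | [a], hlen => exact absurd (by simp) hlen
    | c0 :: c1 :: rest, hlen =>
    simp only []
    set d : Int := (c1.toNat : Int) - (c0.toNat : Int) with hd
    rw [pvAscScan_eq_chain, pvDescScan_eq_chain]
    have hAiff := pvChain_iff_adj 1 (c0 :: c1 :: rest)
    rw [adj_iff_lin] at hAiff
    have hDiff := pvChain_iff_adj (-1) (c0 :: c1 :: rest)
    rw [adj_iff_lin] at hDiff
    have hBiff := enum_all_iff_lin (c0 :: c1 :: rest) (c0.toNat : Int) d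
    have hA0 : pvChain 1 (c0 :: c1 :: rest) = true → (c1.toNat : Int) = (c0.toNat : Int) + 1 := by
      intro h
      simpa using (pvChain_iff_adj 1 (c0 :: c1 :: rest)).mp h 0 (by simp)
    have hD0 : pvChain (-1) (c0 :: c1 :: rest) = true → (c1.toNat : Int) = (c0.toNat : Int) + (-1) := by
      intro h
      simpa using (pvChain_iff_adj (-1) (c0 :: c1 :: rest)).mp h 0 (by simp)
    by_cases h1 : d = 1
    · -- step is +1: A's ascending scan decides; the descending scan fails at the head
      rw [h1] at hBiff
      have hDf : pvChain (-1) (c0 :: c1 :: rest) = false := by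
        apply Bool.eq_false_iff.mpr
        intro h
        have := hD0 h
        omega
      cases hA : pvChain 1 (c0 :: c1 :: rest) with
      | false =>
        have hBf : ((PySem.List.enumerate (c0 :: c1 :: rest) 0).all
            (fun p => decide ((p.2.toNat : Int) = (c0.toNat : Int) + p.1 * 1))) = false := by
          apply Bool.eq_false_iff.mpr
          intro h
          rw [hAiff.mpr (hBiff.mp h)] at hA
          exact Bool.true_eq_false.mp hA
        rw [if_neg (by simp), hDf, h1, if_neg (by norm_num)]
        exact hBf.symm
      | true =>
        have hBt : ((PySem.List.enumerate (c0 :: c1 :: rest) 0).all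
            (fun p => decide ((p.2.toNat : Int) = (c0.toNat : Int) + p.1 * 1))) = true :=
          hBiff.mpr (hAiff.mp hA)
        rw [if_pos rfl, h1, if_neg (by norm_num)]
        exact hBt.symm
    · by_cases h2 : d = -1
      · -- step is -1: A's descending scan decides; the ascending scan fails at the head
        rw [h2] at hBiff
        have hAf : pvChain 1 (c0 :: c1 :: rest) = false := by
          apply Bool.eq_false_iff.mpr
          intro h
          have := hA0 h
          omega
        cases hD : pvChain (-1) (c0 :: c1 :: rest) with
        | false =>
          have hBf : ((PySem.List.enumerate (c0 :: c1 :: rest) 0).all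
              (fun p => decide ((p.2.toNat : Int) = (c0.toNat : Int) + p.1 * (-1)))) = false := by
            apply Bool.eq_false_iff.mpr
            intro h
            rw [hDiff.mpr (hBiff.mp h)] at hD
            exact Bool.true_eq_false.mp hD
          rw [hAf, if_neg (by simp), h2, if_neg (by norm_num)]
          exact hBf.symm
        | true =>
          have hBt : ((PySem.List.enumerate (c0 :: c1 :: rest) 0).all
              (fun p => decide ((p.2.toNat : Int) = (c0.toNat : Int) + p.1 * (-1)))) = true :=
            hBiff.mpr (hDiff.mp hD)
          rw [hAf, if_neg (by simp), h2, if_neg (by norm_num)]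
          exact hBt.symm
      · -- step neither +1 nor -1: both of A's scans fail at the head, B returns false
        have hAf : pvChain 1 (c0 :: c1 :: rest) = false := by
          apply Bool.eq_false_iff.mpr
          intro h
          have := hA0 h
          omega
        have hDf : pvChain (-1) (c0 :: c1 :: rest) = false := by
          apply Bool.eq_false_iff.mpr
          intro h
          have := hD0 h
          omega
        rw [hAf, if_neg (by simp), hDf, if_pos ⟨h1, h2⟩]
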